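-- pv_equiv track=rewrite | github.com/shutpa01/cryptic_solver_v2 | scraper/orchestrator/unified_parse_builder.py | _check_container
-- ===== SOURCE A (Python) =====
-- def _check_container(outer_letters: str, inner_letters: str,
--                      answer: str) -> bool:
--     """
--     Check if outer contains inner = answer.
--     Example: DER contains EAR → D(EAR)ER = DEARER
--     """
--     answer_upper = answer.upper()
--     outer_upper = outer_letters.upper()
--     inner_upper = inner_letters.upper()
--
--     # Try each split of outer as prefix + suffix around inner
--     for i in range(len(outer_upper) + 1):
--         prefix = outer_upper[:i]
--         suffix = outer_upper[i:]
--         combined = prefix + inner_upper + suffix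
--         if combined == answer_upper:
--             return True
--
--     return False
-- ===== SOURCE B (Python) =====
-- def _check_container(outer_letters: str, inner_letters: str,
--                      answer: str) -> bool:
--     answer_upper = answer.upper()
--     outer_upper = outer_letters.upper()
--     inner_upper = inner_letters.upper()
--
--     n = len(answer_upper)
--     k = len(inner_upper)
--     idx = 0
--     # Search for inner inside answer; at each occurrence j, check whether
--     # deleting it from answer reconstructs outer.
--     while idx <= n:
--         j = answer_upper.find(inner_upper, idx)
--         if j == -1:
--             return False
--         if answer_upper[:j] + answer_upper[j + k:] == outer_upper:
--             return True
--         idx = j + 1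
--     return False
-- ===== Notes on version B (the rewrite author's own statement) =====
-- stated objective: faster
-- what changed: Instead of trying every split of outer as prefix+inner+suffix and rebuilding a full candidate answer for each of the len(outer)+1 splits, B scans only the occurrences of inner inside answer via str.find(inner, idx) and checks whether deleting the occurrence reconstructs outer.
import Mathlib
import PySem

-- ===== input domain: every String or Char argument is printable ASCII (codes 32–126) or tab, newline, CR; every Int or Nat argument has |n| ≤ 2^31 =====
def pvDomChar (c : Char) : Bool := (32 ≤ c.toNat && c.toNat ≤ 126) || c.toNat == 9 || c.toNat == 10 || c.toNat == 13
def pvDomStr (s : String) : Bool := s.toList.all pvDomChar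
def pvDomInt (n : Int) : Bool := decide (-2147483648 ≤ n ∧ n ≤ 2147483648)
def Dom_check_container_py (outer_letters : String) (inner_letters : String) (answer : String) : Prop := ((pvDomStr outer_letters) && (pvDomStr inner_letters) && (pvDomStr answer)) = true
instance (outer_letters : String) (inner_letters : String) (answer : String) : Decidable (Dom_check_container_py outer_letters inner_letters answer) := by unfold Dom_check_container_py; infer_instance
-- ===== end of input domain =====

-- B replaces A's "try every split of outer" scan by a search over the occurrences of
-- inner inside answer (str.find), reconstructing outer by deletion — a different decomposition.

-- ===== PORT A =====
-- literal port of A: for i in range(len(outer_upper)+1): compare outer[:i]+inner+outer[i:] with answer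
def check_container_py (outer_letters : String) (inner_letters : String) (answer : String) : Bool :=
  let answer_upper := PySem.Chars.upper answer.toList
  let outer_upper := PySem.Chars.upper outer_letters.toList
  let inner_upper := PySem.Chars.upper inner_letters.toList
  (PySem.List.pyRange 0 ((outer_upper.length : Int) + 1) 1).any (fun i =>
    let pfx := PySem.List.slice outer_upper none (some i)
    let sfx := PySem.List.slice outer_upper (some i) none
    (pfx ++ inner_upper ++ sfx) == answer_upper)

-- ===== PORT B =====
-- the while-loop of Source B: 'while idx <= n', j = answer.find(inner, idx), deletion test, idx = j+1
def checkContainerAltLoop (au : List Char) (ou : List Char) (iu : List Char)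
    (idx : Nat) : Bool :=
  if h : idx ≤ au.length then
    let j := PySem.Chars.findFrom au iu (idx : Int) none
    if hj : j = -1 then false
    else if (PySem.List.slice au none (some j) ++
             PySem.List.slice au (some (j + (iu.length : Int))) none) == ou then true
    else checkContainerAltLoop au ou iu (j.toNat + 1)
  else false
termination_by au.length + 1 - idx
decreasing_by
  have hs := PySem.Chars.findFrom_natCast_spec au iu idx h hj
  omega

def check_container_py_alt (outer_letters : String) (inner_letters : String) (answer : String) : Bool :=
  let answer_upper := PySem.Chars.upper answer.toList
  let outer_upper := PySem.Chars.upper outer_letters.toList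
  let inner_upper := PySem.Chars.upper inner_letters.toList
  checkContainerAltLoop answer_upper outer_upper inner_upper 0

-- ===== PRECONDITION & SPEC =====
def Spec_check_container_py (outer_letters : String) (inner_letters : String) (answer : String) (out : Bool) : Prop := out = check_container_py_alt outer_letters inner_letters answer
instance (outer_letters : String) (inner_letters : String) (answer : String) (out : Bool) : Decidable (Spec_check_container_py outer_letters inner_letters answer out) := by unfold Spec_check_container_py; infer_instance

-- ===== CLAIM (what is proved, stated in full; the proofs are below) =====
def Claim_equal_check_container_py : Prop := ∀ (outer_letters : String) (inner_letters : String) (answer : String), Dom_check_container_py outer_letters inner_letters answer → Spec_check_container_py outer_letters inner_letters answer (check_container_py outer_letters inner_letters answer)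

-- ===== LEMMAS AND PROOFS =====

-- A = true ↔ some split of ou around iu rebuilds au
lemma portA_iff (o i a : String) :
    check_container_py o i a = true ↔
      ∃ k : Nat, k ≤ (PySem.Chars.upper o.toList).length ∧
        (PySem.Chars.upper o.toList).take k ++ PySem.Chars.upper i.toList ++
          (PySem.Chars.upper o.toList).drop k = PySem.Chars.upper a.toList := by
  rw [check_container_py, List.any_eq_true]
  constructor
  · rintro ⟨x, hx, hp⟩
    rw [PySem.List.mem_pyRange_one] at hx
    refine ⟨x.toNat, by omega, ?_⟩
    simp only [beq_iff_eq] at hp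
    rwa [PySem.List.slice_to _ hx.1, PySem.List.slice_from _ hx.1] at hp
  · rintro ⟨k, hk, hsplit⟩
    refine ⟨(k : Int), ?_, ?_⟩
    · rw [PySem.List.mem_pyRange_one]
      exact ⟨by positivity, by omega⟩
    · simp only [beq_iff_eq]
      rw [PySem.List.slice_to _ (by positivity), PySem.List.slice_from _ (by positivity)]
      simpa using hsplit

-- the loop from position idx ↔ an occurrence of iu at some j ≥ idx whose deletion rebuilds ou
lemma altLoop_iff_aux (au ou iu : List Char) :
    ∀ (n idx : Nat), au.length + 1 - idx ≤ n →
    (checkContainerAltLoop au ou iu idx = true ↔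
      ∃ j : Nat, idx ≤ j ∧ j ≤ au.length ∧ iu <+: au.drop j ∧
        au.take j ++ au.drop (j + iu.length) = ou) := by
  intro n
  induction n with
  | zero =>
    intro idx hn
    rw [checkContainerAltLoop]
    have hgt : ¬ idx ≤ au.length := by omega
    simp only [hgt, dif_neg, not_false_iff]
    constructor
    · intro h; exact absurd h (by simp)
    · rintro ⟨j, hij, hjl, -, -⟩; omega
  | succ n ih =>
    intro idx hn
    by_cases hidx : idx ≤ au.length
    · rw [checkContainerAltLoop]
      simp only [hidx, dif_pos]
      by_cases hj : PySem.Chars.findFrom au iu (idx : Int) none = -1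
      · simp only [hj, dif_pos]
        rw [PySem.Chars.findFrom_natCast_eq_neg_one_iff au iu idx hidx] at hj
        constructor
        · intro h; exact absurd h (by simp)
        · rintro ⟨j, hij, hjl, hpre, -⟩
          exfalso
          apply hj
          rw [← PySem.Chars.isIn_iff_infix, ← PySem.Chars.exists_prefix_drop_iff_isIn]
          refine ⟨j - idx, ?_⟩
          rw [List.drop_drop]
          have heq : idx + (j - idx) = j := by omega
          rwa [heq]
      · set j := PySem.Chars.findFrom au iu (idx : Int) none with hjdef
        have hs := PySem.Chars.findFrom_natCast_spec au iu idx hidx hj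
        have hjle : j ≤ (au.length : Int) := by
          rw [hjdef, PySem.Chars.findFrom_natCast au iu idx hidx]
          have hfl := PySem.Chars.find_le_length (au.drop idx) iu
          rw [List.length_drop] at hfl
          split
          · omega
          · omega
        have hj0 : (0:Int) ≤ j := le_trans (by positivity) hs.1
        have hjn : j.toNat ≤ au.length := by omega
        have hsl1 : PySem.List.slice au none (some j) = au.take j.toNat :=
          PySem.List.slice_to au hj0
        have hsl2 : PySem.List.slice au (some (j + (iu.length : Int))) none
            = au.drop (j.toNat + iu.length) := by
          rw [PySem.List.slice_from au (by positivity)]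
          congr 1
          omega
        simp only [hj, dif_neg, not_false_iff, hsl1, hsl2, beq_iff_eq]
        by_cases hdel : au.take j.toNat ++ au.drop (j.toNat + iu.length) = ou
        · simp only [hdel, if_pos]
          constructor
          · intro _
            exact ⟨j.toNat, by omega, hjn, hs.2.1, hdel⟩
          · intro _; trivial
        · rw [if_neg hdel, ih (j.toNat + 1) (by omega)]
          constructor
          · rintro ⟨j', h1, h2, h3, h4⟩
            exact ⟨j', by omega, h2, h3, h4⟩
          · rintro ⟨j', h1, h2, h3, h4⟩
            have hmin : ¬ j' < j.toNat := by
              intro hlt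
              exact hs.2.2 j' h1 hlt h3
            have hne : j' ≠ j.toNat := by
              rintro rfl
              exact hdel h4
            exact ⟨j', by omega, h2, h3, h4⟩
    · rw [checkContainerAltLoop]
      simp only [hidx, dif_neg, not_false_iff]
      constructor
      · intro h; exact absurd h (by simp)
      · rintro ⟨j, hij, hjl, -, -⟩; omega

lemma altLoop_iff (au ou iu : List Char) :
    checkContainerAltLoop au ou iu 0 = true ↔
      ∃ j : Nat, 0 ≤ j ∧ j ≤ au.length ∧ iu <+: au.drop j ∧
        au.take j ++ au.drop (j + iu.length) = ou := by
  exact altLoop_iff_aux au ou iu (au.length + 1) 0 (by omega)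

-- the two existential characterisations coincide
lemma exists_split_iff_exists_del (au ou iu : List Char) :
    (∃ k : Nat, k ≤ ou.length ∧ ou.take k ++ iu ++ ou.drop k = au) ↔
      (∃ j : Nat, 0 ≤ j ∧ j ≤ au.length ∧ iu <+: au.drop j ∧
        au.take j ++ au.drop (j + iu.length) = ou) := by
  constructor
  · rintro ⟨k, hk, hsplit⟩
    have hd : au.drop k = iu ++ ou.drop k := by
      rw [← hsplit, List.append_assoc, List.drop_append_of_le_length (by simp; omega)]
      simp
    refine ⟨k, Nat.zero_le _, ?_, ?_, ?_⟩
    · have : au.length = ou.length + iu.length := by rw [← hsplit]; simp; omega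
      omega
    · rw [hd]; exact List.prefix_append _ _
    · have ht : au.take k = ou.take k := by
        rw [← hsplit, List.append_assoc, List.take_append_of_le_length (by simp; omega)]
        simp
      have hd2 : au.drop (k + iu.length) = ou.drop k := by
        have h1 : au.drop (k + iu.length) = (au.drop k).drop iu.length := by
          rw [List.drop_drop]
        rw [h1, hd, List.drop_append_of_le_length le_rfl]
        simp
      rw [ht, hd2, List.take_append_drop]
  · rintro ⟨j, -, hj, hpre, hdel⟩
    obtain ⟨t, ht⟩ := hpre
    have htd : au.drop (j + iu.length) = t := by
      have h1 : au.drop (j + iu.length) = (au.drop j).drop iu.length := by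
        rw [List.drop_drop]
      rw [h1, ← ht, List.drop_append_of_le_length le_rfl]
      simp
    refine ⟨j, ?_, ?_⟩
    · have : ou.length = j + t.length := by rw [← hdel, htd]; simp; omega
      omega
    · have hot : ou.take j = au.take j := by
        rw [← hdel, List.take_append_of_le_length (by simp [hj])]
        simp [hj]
      have hod : ou.drop j = t := by
        rw [← hdel, List.drop_append_of_le_length (by simp [hj]), htd]
        simp
      rw [hot, hod, List.append_assoc, ht, List.take_append_drop]

-- ===== VERDICT (by name: the statement is the Claim_ definition above) =====
theorem check_container_py_spec : Claim_equal_check_container_py := by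
  intro o i a _
  unfold Spec_check_container_py check_container_py_alt
  rw [Bool.eq_iff_iff, portA_iff, altLoop_iff]
  exact exists_split_iff_exists_del (PySem.Chars.upper a.toList)
    (PySem.Chars.upper o.toList) (PySem.Chars.upper i.toList)
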